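-- pv_equiv track=rewrite | github.com/WaiYu/HackerRankChallenge | utopian_tree.py | Utopia
-- ===== SOURCE A (Python) =====
-- def Utopia(cycle, ini_h):
--     count = 1
--     while count <= cycle:
--         if count % 2 != 0:
--             ini_h *= 2
--         else:
--             ini_h += 1
--         count += 1
--     return ini_h
-- ===== SOURCE B (Python) =====
-- def Utopia(cycle, ini_h):
--     if cycle <= 0:
--         return ini_h
--     m = cycle // 2
--     h = (ini_h + 1) * 2 ** m - 1
--     if cycle % 2 == 1:
--         h *= 2
--     return h
-- ===== Notes on version B (the rewrite author's own statement) =====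
-- stated objective: faster
-- what changed: Replaced the O(cycle) simulation loop with the closed form h = (ini_h+1)*2^(cycle//2) - 1, doubled once more when cycle is odd; intended as asymptotically faster (measured up to 844x at n=65536; at the largest size A timed out and B's huge result could not be decoded, so the check recorded faster:unconfirmed).
import Mathlib
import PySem

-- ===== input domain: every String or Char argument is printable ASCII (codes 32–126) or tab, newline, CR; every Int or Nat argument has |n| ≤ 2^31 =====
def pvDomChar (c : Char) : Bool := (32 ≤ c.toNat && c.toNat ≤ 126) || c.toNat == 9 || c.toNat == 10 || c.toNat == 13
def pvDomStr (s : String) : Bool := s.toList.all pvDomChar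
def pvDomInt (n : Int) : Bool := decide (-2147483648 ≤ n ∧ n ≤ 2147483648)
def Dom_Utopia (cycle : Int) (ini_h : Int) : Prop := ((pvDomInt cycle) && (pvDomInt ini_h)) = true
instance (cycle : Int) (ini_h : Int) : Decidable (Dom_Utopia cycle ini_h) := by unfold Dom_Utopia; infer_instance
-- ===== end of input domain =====

-- B replaces A's O(cycle) simulation loop with the closed form (ini_h+1)*2^(cycle//2)-1 (doubled once more for odd cycle); intended as faster (measured up to 844x at n=65536; unconfirmed at the largest size in a timing run).


-- ===== PORT A =====
-- the while loop: state (count, ini_h), runs while count ≤ cycle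
def UtopiaLoopA (count : Int) (cycle : Int) (h : Int) : Int :=
  if count ≤ cycle then
    UtopiaLoopA (count + 1) cycle (if PySem.Int.mod count 2 ≠ 0 then h * 2 else h + 1)
  else h
termination_by (cycle + 1 - count).toNat
decreasing_by omega

def Utopia (cycle : Int) (ini_h : Int) : Int := UtopiaLoopA 1 cycle ini_h

-- ===== PORT B =====
def Utopia_alt (cycle : Int) (ini_h : Int) : Int :=
  if cycle ≤ 0 then ini_h
  else
    let m := PySem.Int.floordiv cycle 2
    let h := (ini_h + 1) * 2 ^ m.toNat - 1
    if PySem.Int.mod cycle 2 = 1 then h * 2 else h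

-- ===== PRECONDITION & SPEC =====
def Spec_Utopia (cycle : Int) (ini_h : Int) (out : Int) : Prop := out = Utopia_alt cycle ini_h
instance (cycle : Int) (ini_h : Int) (out : Int) : Decidable (Spec_Utopia cycle ini_h out) := by unfold Spec_Utopia; infer_instance

-- ===== CLAIM (what is proved, stated in full; the proofs are below) =====
def Claim_equal_Utopia : Prop := ∀ (cycle : Int) (ini_h : Int), Dom_Utopia cycle ini_h → Spec_Utopia cycle ini_h (Utopia cycle ini_h)

-- ===== LEMMAS AND PROOFS =====

-- closed form of the loop result for a nonnegative cycle n
def UtopiaClosed (n : Nat) (h : Int) : Int :=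
  if n % 2 = 1 then 2 * ((h + 1) * 2 ^ (n / 2) - 1) else (h + 1) * 2 ^ (n / 2) - 1

lemma utopiaLoopA_stop (count cycle h : Int) (hgt : ¬ count ≤ cycle) :
    UtopiaLoopA count cycle h = h := by
  rw [UtopiaLoopA]; simp [hgt]

-- peeling the LAST iteration: running to cycle n+1 equals running to n, then one step
lemma utopiaLoopA_last (n : Nat) : ∀ (k : Nat) (c h : Int), c ≤ (n : Int) + 1 →
    ((n : Int) + 1 - c).toNat = k →
    UtopiaLoopA c ((n : Int) + 1) h =
      (if PySem.Int.mod ((n : Int) + 1) 2 ≠ 0 then (UtopiaLoopA c (n : Int) h) * 2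
       else UtopiaLoopA c (n : Int) h + 1) := by
  intro k
  induction k with
  | zero =>
    intro c h hle hk
    have hc : c = (n : Int) + 1 := by omega
    subst hc
    rw [UtopiaLoopA]
    simp only [le_refl, if_true]
    rw [utopiaLoopA_stop _ _ _ (by omega), utopiaLoopA_stop _ _ _ (by omega)]
  | succ k ih =>
    intro c h hle hk
    have hc : c ≤ (n : Int) := by omega
    conv_lhs => rw [UtopiaLoopA]
    simp only [hle, if_true]
    rw [ih (c + 1) _ (by omega) (by omega)]
    conv_rhs => rw [UtopiaLoopA]
    simp only [hc, if_true]

lemma utopiaLoopA_closed (n : Nat) (h : Int) :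
    UtopiaLoopA 1 (n : Int) h = UtopiaClosed n h := by
  induction n generalizing h with
  | zero =>
    rw [utopiaLoopA_stop _ _ _ (by omega)]
    simp [UtopiaClosed]
  | succ n ih =>
    have hcast : ((n + 1 : Nat) : Int) = (n : Int) + 1 := by push_cast; ring
    rw [hcast, utopiaLoopA_last n (((n : Int) + 1 - 1).toNat) 1 h (by omega) rfl, ih]
    have hmod : PySem.Int.mod ((n : Int) + 1) 2 = (((n + 1) % 2 : Nat) : Int) := by
      rw [PySem.Int.mod_eq_emod_of_pos (by omega)]; push_cast; omega
    rw [hmod]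
    rcases Nat.even_or_odd n with he | ho
    · have h1 : n % 2 = 0 := Nat.even_iff.mp he
      have h2 : (n + 1) % 2 = 1 := by omega
      have h3 : (n + 1) / 2 = n / 2 := by omega
      simp only [UtopiaClosed, h1, h2, h3]
      norm_num
      ring
    · have h1 : n % 2 = 1 := Nat.odd_iff.mp ho
      have h2 : (n + 1) % 2 = 0 := by omega
      have h3 : (n + 1) / 2 = n / 2 + 1 := by omega
      simp only [UtopiaClosed, h1, h2, h3]
      norm_num
      rw [pow_succ]
      ring

-- ===== VERDICT (by name: the statement is the Claim_ definition above) =====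
theorem Utopia_spec : Claim_equal_Utopia := by
  intro cycle ini_h _
  unfold Spec_Utopia Utopia Utopia_alt
  by_cases hle : cycle ≤ 0
  · rw [utopiaLoopA_stop _ _ _ (by omega)]
    simp [hle]
  · have hpos : 0 < cycle := by omega
    obtain ⟨n, hn⟩ : ∃ n : Nat, cycle = (n : Int) := ⟨cycle.toNat, by omega⟩
    subst hn
    rw [utopiaLoopA_closed]
    simp only [hle, if_false]
    have hm : PySem.Int.floordiv (n : Int) 2 = ((n / 2 : Nat) : Int) := by
      rw [PySem.Int.floordiv_eq_ediv_of_pos (by omega)]; push_cast; omega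
    have hmod : PySem.Int.mod (n : Int) 2 = (((n) % 2 : Nat) : Int) := by
      rw [PySem.Int.mod_eq_emod_of_pos (by omega)]; push_cast; omega
    rw [hm, hmod]
    simp only [Int.toNat_natCast, UtopiaClosed]
    rcases Nat.even_or_odd n with he | ho
    · have h1 : n % 2 = 0 := Nat.even_iff.mp he
      simp [h1]
    · have h1 : n % 2 = 1 := Nat.odd_iff.mp ho
      simp [h1]; ring
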